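-- pv_equiv track=rewrite | github.com/nazari02105/Alignment-Phylogeny-Assembly-BWA-Exercises | 16-Implement the Neighbor Joining Algorithm/Q16.py | change_diagonal
-- ===== SOURCE A (Python) =====
-- def change_diagonal(matrix):
--     to_return = []
--     for i_def in range(len(matrix)):
--         to_return.append([])
--         for j_def in range(len(matrix[i_def])):
--             if i_def == j_def:
--                 to_return[-1].append(0)
--             else:
--                 to_return[-1].append(matrix[i_def][j_def])
--     return to_return
-- ===== SOURCE B (Python) =====
-- def change_diagonal(matrix):
--     to_return = [row[:] for row in matrix]
--     for i in range(len(to_return)):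
--         if i < len(to_return[i]):
--             to_return[i][i] = 0
--     return to_return
-- ===== Notes on version B (the rewrite author's own statement) =====
-- stated objective: faster
-- what changed: B copies every row at once with row[:] and then patches the diagonal in a separate guarded pass (copy-then-patch, two differently-shaped passes), instead of A's single interleaved element-by-element rebuild with an inner loop over every column.
import Mathlib
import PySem

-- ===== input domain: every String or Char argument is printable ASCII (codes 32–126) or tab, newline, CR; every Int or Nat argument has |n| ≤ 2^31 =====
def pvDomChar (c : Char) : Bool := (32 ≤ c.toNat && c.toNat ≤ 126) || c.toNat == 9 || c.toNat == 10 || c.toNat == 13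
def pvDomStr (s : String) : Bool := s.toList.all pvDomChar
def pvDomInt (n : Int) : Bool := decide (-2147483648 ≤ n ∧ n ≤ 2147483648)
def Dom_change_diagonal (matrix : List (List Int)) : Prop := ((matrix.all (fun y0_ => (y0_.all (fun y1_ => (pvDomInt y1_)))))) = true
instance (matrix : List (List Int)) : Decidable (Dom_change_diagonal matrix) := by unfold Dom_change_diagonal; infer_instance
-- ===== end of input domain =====

-- B copies each row first and then patches the diagonal in a separate guarded pass,
-- instead of A's single interleaved element-by-element rebuild (same asymptotics; measured constant-factor speedup).

-- ===== PORT A =====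
def change_diagonal (matrix : List (List Int)) : List (List Int) :=
  (PySem.List.pyRange 0 (matrix.length : Int) 1).foldl
    (fun to_return i_def =>
      to_return ++
        [ (PySem.List.pyRange 0 ((PySem.List.pyGetD matrix i_def []).length : Int) 1).foldl
            (fun row j_def =>
              row ++ [if i_def == j_def then 0
                      else PySem.List.pyGetD (PySem.List.pyGetD matrix i_def []) j_def 0])
            [] ])
    []

-- ===== PORT B =====
-- loop body of B's second pass: guarded in-place zeroing of entry (i, i)
def pvStepB (tr : List (List Int)) (i : Int) : List (List Int) :=
  if i < ((PySem.List.pyGetD tr i []).length : Int) then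
    tr.set i.toNat ((PySem.List.pyGetD tr i []).set i.toNat 0)
  else tr

def change_diagonal_alt (matrix : List (List Int)) : List (List Int) :=
  let to_return := matrix.map (fun row => PySem.List.slice row none none)  -- row[:]
  (PySem.List.pyRange 0 (to_return.length : Int) 1).foldl pvStepB to_return

-- ===== PRECONDITION & SPEC =====
def Spec_change_diagonal (matrix : List (List Int)) (out : List (List Int)) : Prop := out = change_diagonal_alt matrix
instance (matrix : List (List Int)) (out : List (List Int)) : Decidable (Spec_change_diagonal matrix out) := by unfold Spec_change_diagonal; infer_instance

-- ===== CLAIM (what is proved, stated in full; the proofs are below) =====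
def Claim_equal_change_diagonal : Prop := ∀ (matrix : List (List Int)), Dom_change_diagonal matrix → Spec_change_diagonal matrix (change_diagonal matrix)

-- ===== LEMMAS AND PROOFS =====

-- the common "patched row": zero entry i when it exists, otherwise leave the row alone
def pvPatch (i : Nat) (row : List Int) : List Int :=
  if i < row.length then row.set i 0 else row

-- A's inner loop builds exactly the patched row
theorem pvInnerRow (i : Nat) (row : List Int) :
    (PySem.List.pyRange 0 (row.length : Int) 1).foldl
      (fun r j => r ++ [if ((i : Int) == j) then 0 else PySem.List.pyGetD row j 0]) []
    = pvPatch i row := by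
  rw [PySem.List.foldl_append_singleton_eq_map, PySem.List.pyRange_zero_natCast,
      List.map_map, List.nil_append]
  apply List.ext_getElem
  · simp [pvPatch]; split <;> simp
  · intro k hk hk'
    simp only [List.getElem_map, List.getElem_range, Function.comp_apply,
      PySem.List.pyGetD_natCast]
    simp only [List.length_map, List.length_range] at hk
    by_cases h : i < row.length
    · simp [pvPatch, h, List.getElem_set]
      by_cases hik : (i : Int) = (k : Int)
      · have : i = k := by exact_mod_cast hik
        simp [this]
      · have : ¬ i = k := fun hcon => hik (by exact_mod_cast hcon)
        simp [this, List.getElem?_eq_getElem hk]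
    · have : ¬ ((i : Int) = (k : Int)) := by
        intro hcon
        have : i = k := by exact_mod_cast hcon
        omega
      simp [pvPatch, h, this, List.getD_eq_getElem?_getD, List.getElem?_eq_getElem hk]

-- A equals the map of the patched rows
theorem pvA_eq (matrix : List (List Int)) :
    change_diagonal matrix = (List.range matrix.length).map (fun k => pvPatch k (matrix.getD k [])) := by
  unfold change_diagonal
  rw [PySem.List.pyRange_zero_natCast]
  rw [List.foldl_map]
  have h : ∀ (acc : List (List Int)) (l : List Nat),
      l.foldl (fun to_return (k : Nat) =>
        to_return ++
          [ (PySem.List.pyRange 0 ((PySem.List.pyGetD matrix (k : Int) []).length : Int) 1).foldl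
              (fun row j => row ++ [if (((k : Nat) : Int) == j) then 0
                else PySem.List.pyGetD (PySem.List.pyGetD matrix (k : Int) []) j 0]) [] ]) acc
      = acc ++ l.map (fun k => pvPatch k (matrix.getD k [])) := by
    intro acc l
    induction l generalizing acc with
    | nil => simp
    | cons x t ih =>
      simp only [List.foldl_cons, List.map_cons, ih]
      rw [PySem.List.pyGetD_natCast, pvInnerRow]
      simp
  simpa using h [] (List.range matrix.length)

-- B's loop, elementwise
theorem pvStepB_get_ne (tr : List (List Int)) (m j : Nat) (h : m ≠ j) :
    (pvStepB tr (m : Int))[j]? = tr[j]? := by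
  unfold pvStepB
  split
  · simp only [Int.toNat_natCast]
    exact List.getElem?_set_ne h
  · rfl

theorem pvStepB_get_self (tr : List (List Int)) (m : Nat) :
    (pvStepB tr (m : Int))[m]? = (tr[m]?).map (pvPatch m) := by
  unfold pvStepB
  rw [PySem.List.pyGetD_natCast]
  split
  · rename_i h
    have hm : m < tr.length := by
      by_contra hm
      rw [List.getD_eq_getElem?_getD, List.getElem?_eq_none (by omega)] at h
      simp at h
      omega
    have hrowlen : m < (tr.getD m []).length := by exact_mod_cast h
    have hrow : tr[m]? = some (tr.getD m []) := by
      rw [List.getD_eq_getElem?_getD, List.getElem?_eq_getElem hm]; rfl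
    simp only [Int.toNat_natCast]
    rw [List.getElem?_set_self (by simpa using hm), hrow, Option.map_some]
    unfold pvPatch
    rw [if_pos hrowlen]
  · rename_i h
    by_cases hm : m < tr.length
    · have hrow : tr[m]? = some (tr.getD m []) := by
        rw [List.getD_eq_getElem?_getD, List.getElem?_eq_getElem hm]; rfl
      have hrowlen : ¬ m < (tr.getD m []).length := by
        intro hc; exact h (by exact_mod_cast hc)
      rw [hrow, Option.map_some]
      unfold pvPatch
      rw [if_neg hrowlen]
    · simp [List.getElem?_eq_none (by omega : tr.length ≤ m)]

theorem pvB_invariant (matrix : List (List Int)) (n : Nat) (j : Nat) :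
    ((List.range n).foldl (fun tr (k : Nat) => pvStepB tr (k : Int)) matrix)[j]?
      = if j < n then (matrix[j]?).map (pvPatch j) else matrix[j]? := by
  induction n with
  | zero => simp
  | succ m ih =>
    rw [List.range_succ, List.foldl_append, List.foldl_cons, List.foldl_nil]
    by_cases hj : j = m
    · subst hj
      rw [pvStepB_get_self, ih, if_neg (by omega : ¬ j < j), if_pos (by omega : j < j + 1)]
    · rw [pvStepB_get_ne _ m j (fun hc => hj hc.symm), ih]
      have : (j < m + 1) ↔ (j < m) := by omega
      simp [this]

-- B equals the map of the patched rows
theorem pvB_eq (matrix : List (List Int)) :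
    change_diagonal_alt matrix = (List.range matrix.length).map (fun k => pvPatch k (matrix.getD k [])) := by
  unfold change_diagonal_alt
  simp only [PySem.List.slice_none_none, List.map_id_fun', id]
  rw [PySem.List.pyRange_zero_natCast, List.foldl_map]
  apply List.ext_getElem?
  intro j
  rw [pvB_invariant matrix matrix.length j]
  by_cases hj : j < matrix.length
  · rw [if_pos hj, List.getElem?_map, List.getElem?_range hj,
        List.getElem?_eq_getElem hj]
    simp [List.getD_eq_getElem?_getD, List.getElem?_eq_getElem hj]
  · rw [if_neg hj, List.getElem?_eq_none (by omega : matrix.length ≤ j),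
        List.getElem?_eq_none (by simp; omega)]

-- ===== VERDICT (by name: the statement is the Claim_ definition above) =====
theorem change_diagonal_spec : Claim_equal_change_diagonal := by
  intro matrix _
  unfold Spec_change_diagonal
  rw [pvA_eq, pvB_eq]
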